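-- pv_equiv track=rewrite | github.com/Chaehyunli/BaekJoon | 프로그래머스/1/92334. 신고 결과 받기/신고 결과 받기.py | solution
-- ===== SOURCE A (Python) =====
-- def solution(id_list, report, k):
--     answer = []
--
--     report = set(report)
--
--     reported_count = {id: 0 for id in id_list} # 신고당한 횟수 리스트(0으로 초기화)
--
--     user_report_list = {id: [] for id in id_list} # 신고한 사람 리스트
--
--     for r in report: # 신고 정보 넣기
--         from_ = r.split()[0]
--         to_ = r.split()[1]
--         reported_count[to_] += 1
--         user_report_list[from_].append(to_)
--
--     for user_id in id_list:
--         mail_count = 0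
--
--         for reported_user in user_report_list[user_id]: # 내가 신고한 사람들 중에
--             if reported_count[reported_user] >= k: # 그 사람이 k번 이상 신고당했다면
--                 mail_count += 1
--
--         answer.append(mail_count)
--
--     return answer
-- ===== SOURCE B (Python) =====
-- def solution(id_list, report, k):
--     seen = set(report)
--     counts = {}
--     for r in seen:
--         to = r.split()[1]
--         counts[to] = counts.get(to, 0) + 1
--     banned = {i for i in id_list if counts.get(i, 0) >= k}
--     result = {i: 0 for i in id_list}
--     for r in seen:
--         frm, to = r.split()[:2]
--         if to in banned:
--             result[frm] += 1
--     return [result[i] for i in id_list]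
-- ===== Notes on version B (the rewrite author's own statement) =====
-- stated objective: simpler
-- what changed: Replaced the per-reporter target-list dict and the nested double loop with a precomputed banned set and a single conditional-counting pass over the deduplicated reports.
import Mathlib
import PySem

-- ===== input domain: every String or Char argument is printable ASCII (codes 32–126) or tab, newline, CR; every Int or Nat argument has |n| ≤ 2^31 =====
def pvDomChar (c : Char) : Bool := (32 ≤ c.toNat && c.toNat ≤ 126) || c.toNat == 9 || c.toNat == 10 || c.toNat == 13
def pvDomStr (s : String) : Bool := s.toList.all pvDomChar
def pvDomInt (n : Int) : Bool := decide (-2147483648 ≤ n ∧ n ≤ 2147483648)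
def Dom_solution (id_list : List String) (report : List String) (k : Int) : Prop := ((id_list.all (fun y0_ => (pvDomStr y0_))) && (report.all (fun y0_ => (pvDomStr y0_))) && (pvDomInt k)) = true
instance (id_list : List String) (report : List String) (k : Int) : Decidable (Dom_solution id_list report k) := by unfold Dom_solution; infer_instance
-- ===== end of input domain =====

-- B replaces A's per-reporter target-list dict and nested double loop by a banned set and one
-- conditional counting pass over the deduplicated reports (objective: simpler).

-- ===== PORT A =====
def solution (id_list : List String) (report : List String) (k : Int) : List Int :=
  let rep : PySem.Set String := PySem.Set.ofList report
  let reported_count : PySem.Dict String Int :=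
    id_list.foldl (fun d id => d.insert id 0) PySem.Dict.empty
  let user_report_list : PySem.Dict String (List String) :=
    id_list.foldl (fun d id => d.insert id []) PySem.Dict.empty
  let st := rep.foldl
    (fun (st : PySem.Dict String Int × PySem.Dict String (List String)) r =>
      let from_ := (PySem.Str.split₀ r).getD 0 ""
      let to_ := (PySem.Str.split₀ r).getD 1 ""
      (st.1.modify to_ 0 (· + 1), st.2.modify from_ [] (· ++ [to_])))
    (reported_count, user_report_list)
  id_list.foldl (fun answer user_id =>
      let mail_count := (st.2.getD user_id []).foldl
        (fun m reported_user => if st.1.getD reported_user 0 ≥ k then m + 1 else m) 0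
      answer ++ [mail_count]) []

-- ===== PORT B =====
def solution_alt (id_list : List String) (report : List String) (k : Int) : List Int :=
  let seen : PySem.Set String := PySem.Set.ofList report
  let counts : PySem.Dict String Int :=
    seen.foldl (fun d r =>
      let to_ := (PySem.Str.split₀ r).getD 1 ""
      d.insert to_ (d.getD to_ 0 + 1)) PySem.Dict.empty
  let banned : PySem.Set String :=
    PySem.Set.ofList (id_list.filter (fun i => counts.getD i 0 ≥ k))
  let result : PySem.Dict String Int :=
    seen.foldl (fun d r =>
      let frm := (PySem.Str.split₀ r).getD 0 ""
      let to_ := (PySem.Str.split₀ r).getD 1 ""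
      if banned.contains to_ then d.insert frm (d.getD frm 0 + 1) else d)
      (id_list.foldl (fun d i => d.insert i 0) PySem.Dict.empty)
  id_list.map (fun i => result.getD i 0)

-- ===== PRECONDITION & SPEC =====
-- Pre_ excludes exactly the inputs on which A raises (IndexError on a report line with fewer
-- than two whitespace-separated tokens, KeyError on a reporter or target not in id_list).
def Pre_solution (id_list : List String) (report : List String) (k : Int) : Prop :=
  ∀ r ∈ report, 2 ≤ (PySem.Str.split₀ r).length ∧
    (PySem.Str.split₀ r).getD 0 "" ∈ id_list ∧ (PySem.Str.split₀ r).getD 1 "" ∈ id_list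
instance (id_list : List String) (report : List String) (k : Int) : Decidable (Pre_solution id_list report k) := by unfold Pre_solution; infer_instance

def pvWitness_solution : List String × List String × Int :=
  (["muzi", "frodo", "apeach", "neo"],
   ["muzi frodo", "apeach frodo", "frodo neo", "muzi neo", "apeach muzi"], 2)

def Spec_solution (id_list : List String) (report : List String) (k : Int) (out : List Int) : Prop := out = solution_alt id_list report k
instance (id_list : List String) (report : List String) (k : Int) (out : List Int) : Decidable (Spec_solution id_list report k out) := by unfold Spec_solution; infer_instance

-- ===== CLAIM (what is proved, stated in full; the proofs are below) =====
def Claim_equal_solution : Prop := ∀ (id_list : List String) (report : List String) (k : Int), Dom_solution id_list report k → Pre_solution id_list report k → Spec_solution id_list report k (solution id_list report k)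

-- ===== LEMMAS AND PROOFS =====

theorem pvGetD_init_const {ν : Type} (l : List String) (d : PySem.Dict String ν) (c : ν)
    (t : String) (h : d.getD t c = c) :
    (l.foldl (fun d i => d.insert i c) d).getD t c = c := by
  induction l generalizing d with
  | nil => exact h
  | cons x xs ih =>
      simp only [List.foldl_cons]
      exact ih _ (by rw [PySem.Dict.getD_insert]; split <;> simp [h])

theorem pvGetD_init_zero (l : List String) (t : String) :
    (l.foldl (fun d i => d.insert i (0 : Int)) PySem.Dict.empty).getD t 0 = 0 :=
  pvGetD_init_const l _ _ t (by simp [PySem.Dict.getD_empty])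

theorem pvGetD_init_nil (l : List String) (t : String) :
    (l.foldl (fun d i => d.insert i ([] : List String)) PySem.Dict.empty).getD t [] = [] :=
  pvGetD_init_const l _ _ t (by simp [PySem.Dict.getD_empty])

theorem pvGetD_keyed_count_insert (l : List String) (g : String → String)
    (d : PySem.Dict String Int) (t : String) :
    (l.foldl (fun d r => d.insert (g r) (d.getD (g r) 0 + 1)) d).getD t 0 =
      d.getD t 0 + (l.countP (fun r => g r == t) : Int) := by
  induction l generalizing d with
  | nil => simp
  | cons x xs ih =>
      simp only [List.foldl_cons, ih, List.countP_cons]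
      rw [PySem.Dict.getD_insert]
      by_cases h : t = g x
      · simp [h]; ring
      · simp [h]; exact fun hh => h hh.symm

theorem pvGetD_keyed_count_modify (l : List String) (g : String → String)
    (d : PySem.Dict String Int) (t : String) :
    (l.foldl (fun d r => d.modify (g r) 0 (· + 1)) d).getD t 0 =
      d.getD t 0 + (l.countP (fun r => g r == t) : Int) := by
  induction l generalizing d with
  | nil => simp
  | cons x xs ih =>
      simp only [List.foldl_cons, ih, List.countP_cons]
      rw [PySem.Dict.getD_modify]
      by_cases h : t = g x
      · simp [h]; ring
      · simp [h]; exact fun hh => h hh.symm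

theorem pvGetD_keyed_append (l : List String) (f0 f1 : String → String)
    (d : PySem.Dict String (List String)) (c : String) :
    (l.foldl (fun d r => d.modify (f0 r) [] (· ++ [f1 r])) d).getD c [] =
      d.getD c [] ++ (l.filter (fun r => f0 r == c)).map f1 := by
  induction l generalizing d with
  | nil => simp
  | cons x xs ih =>
      simp only [List.foldl_cons, ih, List.filter_cons]
      rw [PySem.Dict.getD_modify]
      by_cases h : c = f0 x
      · simp [h]
      · have h2 : ¬ (f0 x = c) := fun hh => h hh.symm
        simp [h, h2]

-- ===== VERDICT (by name: the statement is the Claim_ definition above) =====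
theorem solution_spec : Claim_equal_solution := by
  intro id_list report k _dom hpre
  unfold Spec_solution solution solution_alt
  simp only []
  rw [PySem.List.foldl_prod_mk
    (f := fun (d : PySem.Dict String Int) (r : String) => d.modify ((PySem.Str.split₀ r).getD 1 "") 0 (· + 1))
    (g := fun (d : PySem.Dict String (List String)) (r : String) => d.modify ((PySem.Str.split₀ r).getD 0 "") [] (· ++ [(PySem.Str.split₀ r).getD 1 ""]))]
  rw [PySem.List.foldl_append_singleton_eq_map, List.nil_append]
  refine List.map_congr_left ?_
  intro uid _huid
  simp only [pvGetD_keyed_append, pvGetD_init_nil, List.nil_append,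
    PySem.List.foldl_ite_add_one, pvGetD_keyed_count_modify, pvGetD_init_zero,
    List.countP_map, List.countP_filter, zero_add]
  rw [PySem.List.foldl_ite_eq_foldl_filter
    (p := fun r : String => (PySem.Set.ofList (List.filter (fun i =>
      decide ((List.foldl (fun (d : PySem.Dict String Int) (r : String) =>
        d.insert ((PySem.Str.split₀ r).getD 1 "")
          (d.getD ((PySem.Str.split₀ r).getD 1 "") 0 + 1)) PySem.Dict.empty
        (PySem.Set.ofList report)).getD i 0 ≥ k)) id_list)).contains
        ((PySem.Str.split₀ r).getD 1 "") = true)]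
  simp only [pvGetD_keyed_count_insert, pvGetD_init_zero, zero_add, List.countP_filter]
  norm_cast
  refine List.countP_congr ?_
  intro r hr
  obtain ⟨-, -, h1⟩ := hpre r ((PySem.Set.mem_ofList report r).mp hr)
  simp only [Function.comp, Bool.and_eq_true, decide_eq_true_eq, beq_iff_eq,
    PySem.Set.contains, List.contains_iff_mem, PySem.Set.mem_ofList, List.mem_filter]
  constructor
  · rintro ⟨hk, he⟩; exact ⟨he, h1, by simpa using hk⟩
  · rintro ⟨he, -, hk⟩; exact ⟨by simpa using hk, he⟩
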